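-- pv_equiv track=rewrite | github.com/naganandsb/Python | two_signal_basic_op.py | triangle_gen
-- ===== SOURCE A (Python) =====
-- def triangle_gen(input_wave):
--     tmp_list =[]
--     int_val =0
--     for i in input_wave:
--         if(i >0):
--             int_val +=1
--         else:
--             int_val -=1
--         tmp_list.append(int_val)
--     return(tmp_list)
-- ===== SOURCE B (Python) =====
-- def triangle_gen(input_wave):
--     # Divide and conquer: prefix counts of a concatenation are the left half's
--     # prefix counts followed by the right half's prefix counts shifted by the
--     # left half's final value.
--     n = len(input_wave)
--     if n == 0:
--         return []
--     if n == 1: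
--         return [1 if input_wave[0] > 0 else -1]
--     mid = n // 2
--     left = triangle_gen(input_wave[:mid])
--     right = triangle_gen(input_wave[mid:])
--     off = left[-1]
--     return left + [off + v for v in right]
-- ===== Notes on version B (the rewrite author's own statement) =====
-- stated objective: alternative
-- what changed: Replaced A's single fused loop with a running counter by a recursive divide-and-conquer: split the wave in halves, compute each half's prefix counts recursively, and shift the right half's result by the left half's final value.
import Mathlib
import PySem

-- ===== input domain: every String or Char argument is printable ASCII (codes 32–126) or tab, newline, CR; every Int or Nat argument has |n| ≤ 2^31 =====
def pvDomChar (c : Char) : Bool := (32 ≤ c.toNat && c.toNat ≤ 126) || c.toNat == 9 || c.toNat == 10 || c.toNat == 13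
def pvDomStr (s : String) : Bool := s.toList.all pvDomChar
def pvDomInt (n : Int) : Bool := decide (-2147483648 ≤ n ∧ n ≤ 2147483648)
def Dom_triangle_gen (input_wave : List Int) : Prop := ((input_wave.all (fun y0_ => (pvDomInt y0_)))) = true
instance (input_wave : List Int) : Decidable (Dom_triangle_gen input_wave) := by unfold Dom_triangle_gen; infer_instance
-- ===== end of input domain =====

-- B replaces A's fused running-counter loop by divide-and-conquer: prefix counts of each half, right half shifted by the left half's final value; alternative decomposition, not faster.

-- ===== PORT A =====
-- loop state: (tmp_list, int_val); append int_val after updating it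
def triangle_gen (input_wave : List Int) : List Int :=
  (input_wave.foldl
    (fun (s : List Int × Int) i =>
      let v := if i > 0 then s.2 + 1 else s.2 - 1
      (s.1 ++ [v], v))
    ([], 0)).1

-- ===== PORT B =====
-- input_wave[:mid] / input_wave[mid:] with 0 ≤ mid ≤ n are exactly take/drop;
-- left[-1] on the (provably nonempty) left result is exactly getLastD 0.
def triangle_gen_alt (input_wave : List Int) : List Int :=
  match input_wave with
  | [] => []
  | [x] => [if x > 0 then (1 : Int) else -1]
  | x :: y :: rest =>
    let n := (x :: y :: rest).length
    let mid := n / 2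
    let left := triangle_gen_alt ((x :: y :: rest).take mid)
    let right := triangle_gen_alt ((x :: y :: rest).drop mid)
    let off := left.getLastD 0
    left ++ right.map (fun v => off + v)
termination_by input_wave.length
decreasing_by
  · simp only [List.length_take, List.length_cons]; omega
  · simp only [List.length_drop, List.length_cons]; omega

-- ===== PRECONDITION & SPEC =====
def Spec_triangle_gen (input_wave : List Int) (out : List Int) : Prop := out = triangle_gen_alt input_wave
instance (input_wave : List Int) (out : List Int) : Decidable (Spec_triangle_gen input_wave out) := by unfold Spec_triangle_gen; infer_instance

-- ===== CLAIM (what is proved, stated in full; the proofs are below) =====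
def Claim_equal_triangle_gen : Prop := ∀ (input_wave : List Int), Dom_triangle_gen input_wave → Spec_triangle_gen input_wave (triangle_gen input_wave)

-- ===== LEMMAS AND PROOFS =====
-- reference: the list of running ±1 counts starting from c
def pvPrefix (c : Int) : List Int → List Int
  | [] => []
  | x :: xs =>
    let v := if x > 0 then c + 1 else c - 1
    v :: pvPrefix v xs

-- the final counter value after consuming xs starting from c
def pvEnd (c : Int) : List Int → Int
  | [] => c
  | x :: xs => pvEnd (if x > 0 then c + 1 else c - 1) xs

theorem pvPrefix_append (l r : List Int) (c : Int) :
    pvPrefix c (l ++ r) = pvPrefix c l ++ pvPrefix (pvEnd c l) r := by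
  induction l generalizing c with
  | nil => simp [pvPrefix, pvEnd]
  | cons x t ih => simp [pvPrefix, pvEnd, ih]

theorem pvPrefix_shift (a b : Int) (xs : List Int) :
    pvPrefix (a + b) xs = (pvPrefix b xs).map (fun v => a + v) := by
  induction xs generalizing b with
  | nil => simp [pvPrefix]
  | cons x t ih =>
    by_cases h : x > 0 <;>
      simp [pvPrefix, h, ← ih, add_assoc, add_sub_assoc]

theorem pvPrefix_getLastD (xs : List Int) (hxs : xs ≠ []) (c d : Int) :
    (pvPrefix c xs).getLastD d = pvEnd c xs := by
  induction xs generalizing c d with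
  | nil => exact absurd rfl hxs
  | cons x t ih =>
    cases t with
    | nil => simp [pvPrefix, pvEnd]
    | cons y u =>
      have hstep : pvPrefix c (x :: y :: u)
          = (if x > 0 then c + 1 else c - 1) :: pvPrefix (if x > 0 then c + 1 else c - 1) (y :: u) := by
        simp [pvPrefix]
      rw [hstep, List.getLastD_cons, ih (by simp)]
      simp [pvEnd]

theorem triangle_gen_loop (xs : List Int) (acc : List Int) (v : Int) :
    (xs.foldl
      (fun (s : List Int × Int) i =>
        let w := if i > 0 then s.2 + 1 else s.2 - 1
        (s.1 ++ [w], w))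
      (acc, v)).1
    = acc ++ pvPrefix v xs := by
  induction xs generalizing acc v with
  | nil => simp [pvPrefix]
  | cons x t ih =>
    simp only [List.foldl_cons, pvPrefix]
    rw [ih]
    by_cases h : x > 0 <;> simp [h, List.append_assoc]

theorem triangle_gen_alt_eq (xs : List Int) : triangle_gen_alt xs = pvPrefix 0 xs := by
  fun_induction triangle_gen_alt xs with
  | case1 => simp [pvPrefix]
  | case2 x => simp [pvPrefix]
  | case3 x y rest n mid left right off ihl ihr =>
    simp only [off, left, right, mid, n] at ihl ihr ⊢
    rw [ihl, ihr]
    have htne : (x :: y :: rest).take ((x :: y :: rest).length / 2) ≠ [] := by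
      intro h
      have := congrArg List.length h
      simp [List.length_take] at this
    rw [pvPrefix_getLastD _ htne]
    conv_rhs => rw [← List.take_append_drop ((x :: y :: rest).length / 2) (x :: y :: rest)]
    rw [pvPrefix_append]
    congr 1
    simpa using (pvPrefix_shift (pvEnd 0 ((x :: y :: rest).take ((x :: y :: rest).length / 2))) 0
      ((x :: y :: rest).drop ((x :: y :: rest).length / 2))).symm

-- ===== VERDICT (by name: the statement is the Claim_ definition above) =====
theorem triangle_gen_spec : Claim_equal_triangle_gen := by
  intro w _
  show triangle_gen w = triangle_gen_alt w
  rw [triangle_gen_alt_eq]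
  unfold triangle_gen
  simpa using triangle_gen_loop w [] 0
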